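-- pv_equiv track=rewrite | github.com/mangchhe/algorithm | programmers/kakao intern/키패드 누르기.py | solution
-- ===== SOURCE A (Python) =====
-- def solution(numbers, hand):
--
--     answer = ''
--     L = '*'
--     R = '#'
--     keypad = [[1, 2, 3], [4, 5, 6], [7, 8, 9], ['*', 0, '#']]
--
--     for i in numbers:
--         if i in [1, 4, 7]:
--             answer += 'L'
--             L = i
--         elif i in [3, 6, 9]:
--             answer += 'R'
--             R = i
--         else:
--             L_pos = 0
--             R_pos = 0
--             C_pos = 0
--
--             for k in range(4):
--                 for l in range(3):
--                     if keypad[k][l] == L: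
--                         L_pos = (k, l)
--                     if keypad[k][l] == R:
--                         R_pos = (k, l)
--                     if keypad[k][l] == i:
--                         C_pos = (k, l)
--
--             LL = abs(L_pos[0] - C_pos[0]) + abs(L_pos[1] - C_pos[1])
--             RR = abs(R_pos[0] - C_pos[0]) + abs(R_pos[1] - C_pos[1])
--
--             if LL == RR:
--                 if hand == 'right':
--                     answer += 'R'
--                     R = i
--                 elif hand == 'left':
--                     answer += 'L'
--                     L = i
--             elif LL > RR:
--                 answer += 'R'
--                 R = i
--             else:
--                 answer += 'L'
--                 L = i
--
--     return answer
-- ===== SOURCE B (Python) =====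
-- def solution(numbers, hand):
--     # Table-driven automaton: precompute the full finite transition table over all
--     # reachable (left, right) thumb states and digits, then run the input through it.
--     # Keys named by digit, with 10 standing for '*' and 11 for '#'.
--     LEFTS = (10, 1, 4, 7, 0, 2, 5, 8)
--     RIGHTS = (11, 3, 6, 9, 0, 2, 5, 8)
--
--     def row(k):
--         return 3 if k in (0, 10, 11) else (k - 1) // 3
--
--     def col(k):
--         if k in (1, 4, 7, 10):
--             return 0
--         if k in (3, 6, 9, 11):
--             return 2
--         return 1
--
--     def entry(l, r, d):
--         if d in (1, 4, 7):
--             return ('L', d, r)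
--         if d in (3, 6, 9):
--             return ('R', l, d)
--         dl = abs(row(l) - row(d)) + abs(col(l) - 1)
--         dr = abs(row(r) - row(d)) + abs(col(r) - 1)
--         if dl < dr or (dl == dr and hand == 'left'):
--             return ('L', d, r)
--         if dl > dr or hand == 'right':
--             return ('R', l, d)
--         return ('', l, r)
--
--     table = {(l, r, d): entry(l, r, d)
--              for l in LEFTS for r in RIGHTS for d in range(10)}
--
--     answer = ''
--     l, r = 10, 11
--     for d in numbers:
--         ch, l, r = table[(l, r, d)]
--         answer += ch
--     return answer
-- ===== Notes on version B (the rewrite author's own statement) =====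
-- stated objective: alternative
-- what changed: B precomputes the complete finite transition table of the keypad automaton (all 8x8 reachable thumb-state pairs x 10 digits, with row/column arithmetic instead of a grid scan) and then runs the input digits through that table in a single lookup-per-digit pass, instead of A's per-digit branch-and-nested-12-cell-scan simulation.
import Mathlib
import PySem

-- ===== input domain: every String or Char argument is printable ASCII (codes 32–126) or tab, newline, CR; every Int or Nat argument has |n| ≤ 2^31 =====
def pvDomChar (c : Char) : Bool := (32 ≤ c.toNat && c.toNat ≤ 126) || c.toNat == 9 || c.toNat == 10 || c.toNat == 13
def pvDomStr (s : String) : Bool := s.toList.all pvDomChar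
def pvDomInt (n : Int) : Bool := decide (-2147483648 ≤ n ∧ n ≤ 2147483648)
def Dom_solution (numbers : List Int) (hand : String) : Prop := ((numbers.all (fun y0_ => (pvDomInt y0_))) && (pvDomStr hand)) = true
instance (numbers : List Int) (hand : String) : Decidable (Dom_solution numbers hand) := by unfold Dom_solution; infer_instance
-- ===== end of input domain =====

-- B precomputes the finite transition table of the keypad automaton once and runs the
-- digits through it by lookup, instead of A's per-digit branch-and-nested-scan (objective: alternative).

-- ===== PORT A =====
-- keypad cells are the mixed-type Python values 1..9, 0, '*', '#'
inductive Cell : Type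
  | num : Int → Cell
  | star : Cell
  | hash : Cell
deriving DecidableEq, Repr

def keypadA : List (List Cell) :=
  [[Cell.num 1, Cell.num 2, Cell.num 3],
   [Cell.num 4, Cell.num 5, Cell.num 6],
   [Cell.num 7, Cell.num 8, Cell.num 9],
   [Cell.star, Cell.num 0, Cell.hash]]

-- keypad[k][l]; indices produced by the loops are always in range
def kpGet (k l : Int) : Cell :=
  PySem.List.pyGetD (PySem.List.pyGetD keypadA k []) l Cell.star

-- the inner double loop of A: one pass over the 12 cells updating (L_pos, R_pos, C_pos)
def aScan (L R t : Cell) : Option (Int × Int) × Option (Int × Int) × Option (Int × Int) :=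
  (PySem.List.pyRange 0 4 1).foldl (fun s2 k =>
    (PySem.List.pyRange 0 3 1).foldl (fun s3 l =>
      (if kpGet k l = L then some (k, l) else s3.1,
       if kpGet k l = R then some (k, l) else s3.2.1,
       if kpGet k l = t then some (k, l) else s3.2.2)) s2) (none, none, none)

def aStep (hand : String) (st : String × Cell × Cell) (i : Int) : String × Cell × Cell :=
  match st with
  | (answer, L, R) =>
    if i = 1 ∨ i = 4 ∨ i = 7 then (answer ++ "L", Cell.num i, R)
    else if i = 3 ∨ i = 6 ∨ i = 9 then (answer ++ "R", L, Cell.num i)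
    else
      let scan := aScan L R (Cell.num i)
      -- Python initialises L_pos/R_pos/C_pos to the int 0 and raises TypeError on
      -- 'C_pos[0]' if the target is never found; that happens only outside Pre_solution,
      -- where '.getD (0, 0)' stands in.
      let Lp := scan.1.getD (0, 0)
      let Rp := scan.2.1.getD (0, 0)
      let Cp := scan.2.2.getD (0, 0)
      let LL := |Lp.1 - Cp.1| + |Lp.2 - Cp.2|
      let RR := |Rp.1 - Cp.1| + |Rp.2 - Cp.2|
      if LL = RR then
        if hand = "right" then (answer ++ "R", L, Cell.num i)
        else if hand = "left" then (answer ++ "L", Cell.num i, R)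
        else (answer, L, R)
      else if LL > RR then (answer ++ "R", L, Cell.num i)
      else (answer ++ "L", Cell.num i, R)

def solution (numbers : List Int) (hand : String) : String :=
  (numbers.foldl (aStep hand) ("", Cell.star, Cell.hash)).1

-- ===== PORT B =====
-- keys named by digit, 10 = '*', 11 = '#'
def leftsB : List Int := [10, 1, 4, 7, 0, 2, 5, 8]
def rightsB : List Int := [11, 3, 6, 9, 0, 2, 5, 8]

def rowB (k : Int) : Int :=
  if k = 0 ∨ k = 10 ∨ k = 11 then 3 else PySem.Int.floordiv (k - 1) 3

def colB (k : Int) : Int :=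
  if k = 1 ∨ k = 4 ∨ k = 7 ∨ k = 10 then 0
  else if k = 3 ∨ k = 6 ∨ k = 9 ∨ k = 11 then 2
  else 1

def entryB (hand : String) (l r d : Int) : String × Int × Int :=
  if d = 1 ∨ d = 4 ∨ d = 7 then ("L", d, r)
  else if d = 3 ∨ d = 6 ∨ d = 9 then ("R", l, d)
  else
    let dl := |rowB l - rowB d| + |colB l - 1|
    let dr := |rowB r - rowB d| + |colB r - 1|
    if dl < dr ∨ (dl = dr ∧ hand = "left") then ("L", d, r)
    else if dl > dr ∨ hand = "right" then ("R", l, d)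
    else ("", l, r)

-- the dict comprehension: insert entry(l, r, d) for each key triple in order
def keysB : List (Int × Int × Int) :=
  leftsB.flatMap (fun l => rightsB.flatMap (fun r =>
    (PySem.List.pyRange 0 10 1).map (fun d => (l, r, d))))

def tableB (hand : String) : PySem.Dict (Int × Int × Int) (String × Int × Int) :=
  keysB.foldl (fun t k => t.insert k (entryB hand k.1 k.2.1 k.2.2)) PySem.Dict.empty

-- one iteration of B's run loop; 'table[(l, r, d)]' raises KeyError when the key is
-- missing, which happens only outside Pre_solution, where '.getD' stands in.
def bRun (tbl : PySem.Dict (Int × Int × Int) (String × Int × Int))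
    (st : String × Int × Int) (d : Int) : String × Int × Int :=
  match st with
  | (answer, l, r) =>
    let e := (tbl.get? (l, r, d)).getD ("", l, r)
    (answer ++ e.1, e.2.1, e.2.2)

def solution_alt (numbers : List Int) (hand : String) : String :=
  (numbers.foldl (bRun (tableB hand)) ("", 10, 11)).1

-- ===== PRECONDITION & SPEC =====
-- Pre_ excludes lists containing a number outside 0..9, on which A raises TypeError
-- (its position sentinel 0 is not a tuple).
def Pre_solution (numbers : List Int) (hand : String) : Prop :=
  ∀ n ∈ numbers, 0 ≤ n ∧ n ≤ 9
instance (numbers : List Int) (hand : String) : Decidable (Pre_solution numbers hand) := by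
  unfold Pre_solution; infer_instance
def pvWitness_solution : List Int × String := ([1, 5, 2, 0, 9], "right")

def Spec_solution (numbers : List Int) (hand : String) (out : String) : Prop := out = solution_alt numbers hand
instance (numbers : List Int) (hand : String) (out : String) : Decidable (Spec_solution numbers hand out) := by unfold Spec_solution; infer_instance

-- ===== CLAIM (what is proved, stated in full; the proofs are below) =====
def Claim_equal_solution : Prop := ∀ (numbers : List Int) (hand : String), Dom_solution numbers hand → Pre_solution numbers hand → Spec_solution numbers hand (solution numbers hand)

-- ===== LEMMAS AND PROOFS =====

-- reachable thumb states of A, and their digit encodings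
def okL : Cell → Prop
  | Cell.star => True
  | Cell.hash => False
  | Cell.num d => d = 1 ∨ d = 4 ∨ d = 7 ∨ d = 0 ∨ d = 2 ∨ d = 5 ∨ d = 8

def okR : Cell → Prop
  | Cell.star => False
  | Cell.hash => True
  | Cell.num d => d = 3 ∨ d = 6 ∨ d = 9 ∨ d = 0 ∨ d = 2 ∨ d = 5 ∨ d = 8

def enc : Cell → Int
  | Cell.star => 10
  | Cell.hash => 11
  | Cell.num d => d

def gmap (s : String × Cell × Cell) : String × Int × Int :=
  (s.1, enc s.2.1, enc s.2.2)

-- single-target version of A's scan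
def findPos (t : Cell) : Option (Int × Int) :=
  (PySem.List.pyRange 0 4 1).foldl (fun s k =>
    (PySem.List.pyRange 0 3 1).foldl (fun s l =>
      if kpGet k l = t then some (k, l) else s) s) none

lemma aScan_split (L R t : Cell) : aScan L R t = (findPos L, findPos R, findPos t) := rfl

lemma coordL_eq (c : Cell) (h : okL c) : findPos c = some (rowB (enc c), colB (enc c)) := by
  cases c with
  | star => decide
  | hash => exact h.elim
  | num d => rcases h with h | h | h | h | h | h | h <;> subst h <;> decide

lemma coordR_eq (c : Cell) (h : okR c) : findPos c = some (rowB (enc c), colB (enc c)) := by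
  cases c with
  | star => exact h.elim
  | hash => decide
  | num d => rcases h with h | h | h | h | h | h | h <;> subst h <;> decide

lemma okL_mem (c : Cell) (h : okL c) : enc c ∈ leftsB := by
  cases c with
  | star => decide
  | hash => exact h.elim
  | num d => rcases h with h | h | h | h | h | h | h <;> subst h <;> decide

lemma okR_mem (c : Cell) (h : okR c) : enc c ∈ rightsB := by
  cases c with
  | star => exact h.elim
  | hash => decide
  | num d => rcases h with h | h | h | h | h | h | h <;> subst h <;> decide

lemma mem_keysB (l r d : Int) (hl : l ∈ leftsB) (hr : r ∈ rightsB)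
    (h0 : 0 ≤ d) (h9 : d ≤ 9) : (l, r, d) ∈ keysB := by
  simp only [keysB, List.mem_flatMap, List.mem_map]
  exact ⟨l, hl, r, hr, d, (PySem.List.mem_pyRange_one).2 ⟨h0, by omega⟩, rfl⟩

-- lookup in a dict built by inserting f(k) for every key of a list
lemma get?_foldl_insert_fn {κ ν : Type} [DecidableEq κ] [BEq κ] [LawfulBEq κ]
    (f : κ → ν) (ks : List κ) (t : PySem.Dict κ ν) (k : κ) :
    (ks.foldl (fun t k => t.insert k (f k)) t).get? k
      = if k ∈ ks then some (f k) else t.get? k := by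
  induction ks generalizing t with
  | nil => simp
  | cons a ks ih =>
    simp only [List.foldl_cons, ih, List.mem_cons]
    by_cases hk : k ∈ ks
    · simp [hk]
    · by_cases hka : k = a
      · subst hka; simp [hk, PySem.Dict.get?_insert_self]
      · simp [hk, hka, PySem.Dict.get?_insert_of_ne _ _ hka]

lemma tableB_get (hand : String) (l r d : Int) (hl : l ∈ leftsB) (hr : r ∈ rightsB)
    (h0 : 0 ≤ d) (h9 : d ≤ 9) :
    (tableB hand).get? (l, r, d) = some (entryB hand l r d) := by
  unfold tableB
  rw [get?_foldl_insert_fn (fun k => entryB hand k.1 k.2.1 k.2.2) keysB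
    PySem.Dict.empty (l, r, d), if_pos (mem_keysB l r d hl hr h0 h9)]

lemma fastL_comm (hand ans : String) (L R : Cell) (hR : okR R) (i : Int)
    (h17 : i = 1 ∨ i = 4 ∨ i = 7) (hl : enc L ∈ leftsB) (h0 : 0 ≤ i) (h9 : i ≤ 9) :
    gmap (aStep hand (ans, L, R) i) = bRun (tableB hand) (gmap (ans, L, R)) i ∧
      okL (aStep hand (ans, L, R) i).2.1 ∧ okR (aStep hand (ans, L, R) i).2.2 := by
  simp only [aStep, bRun, gmap, if_pos h17,
    tableB_get hand (enc L) (enc R) i hl (okR_mem R hR) h0 h9,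
    entryB, Option.getD_some]
  refine ⟨rfl, ?_, hR⟩
  rcases h17 with h | h | h <;> subst h <;> simp [okL]

lemma fastR_comm (hand ans : String) (L R : Cell) (hL : okL L) (i : Int)
    (h17 : ¬(i = 1 ∨ i = 4 ∨ i = 7)) (h39 : i = 3 ∨ i = 6 ∨ i = 9)
    (hr : enc R ∈ rightsB) (h0 : 0 ≤ i) (h9 : i ≤ 9) :
    gmap (aStep hand (ans, L, R) i) = bRun (tableB hand) (gmap (ans, L, R)) i ∧
      okL (aStep hand (ans, L, R) i).2.1 ∧ okR (aStep hand (ans, L, R) i).2.2 := by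
  simp only [aStep, bRun, gmap, if_neg h17, if_pos h39,
    tableB_get hand (enc L) (enc R) i (okL_mem L hL) hr h0 h9,
    entryB, Option.getD_some]
  refine ⟨rfl, hL, ?_⟩
  rcases h39 with h | h | h <;> subst h <;> simp [okR]

lemma middle_comm (hand ans : String) (L R : Cell) (hL : okL L) (hR : okR R) (i : Int)
    (h17 : ¬(i = 1 ∨ i = 4 ∨ i = 7)) (h39 : ¬(i = 3 ∨ i = 6 ∨ i = 9))
    (h0 : 0 ≤ i) (h9 : i ≤ 9)
    (hcol : colB i = 1) (hokL : okL (Cell.num i)) (hokR : okR (Cell.num i))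
    (hfind : findPos (Cell.num i) = some (rowB i, colB i)) :
    gmap (aStep hand (ans, L, R) i) = bRun (tableB hand) (gmap (ans, L, R)) i ∧
      okL (aStep hand (ans, L, R) i).2.1 ∧ okR (aStep hand (ans, L, R) i).2.2 := by
  simp only [aStep, bRun, gmap, if_neg h17, if_neg h39,
    tableB_get hand (enc L) (enc R) i (okL_mem L hL) (okR_mem R hR) h0 h9,
    entryB, Option.getD_some, aScan_split, coordL_eq L hL, coordR_eq R hR, hfind, hcol,
    Option.getD_some, gt_iff_lt]
  generalize |rowB (enc L) - rowB i| + |colB (enc L) - 1| = LL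
  generalize |rowB (enc R) - rowB i| + |colB (enc R) - 1| = RR
  rcases lt_trichotomy LL RR with h | h | h
  · have c1 : LL < RR ∨ (LL = RR ∧ hand = "left") := Or.inl h
    rw [if_neg h.ne, if_neg (not_lt.mpr h.le), if_pos c1]
    exact ⟨rfl, hokL, hR⟩
  · by_cases hr : hand = "right"
    · have c1 : ¬(LL < RR ∨ (LL = RR ∧ hand = "left")) := by
        push Not
        exact ⟨by simp [h], fun _ => by simp [hr]⟩
      rw [if_pos h, if_pos hr, if_neg c1, if_pos (Or.inr hr)]
      exact ⟨rfl, hL, hokR⟩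
    · by_cases hl : hand = "left"
      · have c1 : LL < RR ∨ (LL = RR ∧ hand = "left") := Or.inr ⟨h, hl⟩
        rw [if_pos h, if_neg hr, if_pos hl, if_pos c1]
        exact ⟨rfl, hokL, hR⟩
      · have c1 : ¬(LL < RR ∨ (LL = RR ∧ hand = "left")) := by
          push Not
          exact ⟨by simp [h], fun _ => hl⟩
        have c2 : ¬(RR < LL ∨ hand = "right") := by
          push Not
          exact ⟨by simp [h], hr⟩
        rw [if_pos h, if_neg hr, if_neg hl, if_neg c1, if_neg c2]
        exact ⟨by simp [String.append_empty], hL, hR⟩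
  · have c1 : ¬(LL < RR ∨ (LL = RR ∧ hand = "left")) := by
      push Not
      exact ⟨h.le, fun he => absurd he h.ne'⟩
    rw [if_neg h.ne', if_pos h, if_neg c1, if_pos (Or.inl h)]
    exact ⟨rfl, hL, hokR⟩

lemma step_comm (hand : String) (s : String × Cell × Cell)
    (hL : okL s.2.1) (hR : okR s.2.2) (i : Int) (h0 : 0 ≤ i) (h9 : i ≤ 9) :
    gmap (aStep hand s i) = bRun (tableB hand) (gmap s) i ∧
      okL (aStep hand s i).2.1 ∧ okR (aStep hand s i).2.2 := by
  obtain ⟨ans, L, R⟩ := s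
  simp only at hL hR
  interval_cases i
  · exact middle_comm hand ans L R hL hR 0 (by decide) (by decide) (by decide) (by decide) (by decide) (by simp [okL]) (by simp [okR]) (by decide)
  · exact fastL_comm hand ans L R hR 1 (by decide) (okL_mem L hL) (by decide) (by decide)
  · exact middle_comm hand ans L R hL hR 2 (by decide) (by decide) (by decide) (by decide) (by decide) (by simp [okL]) (by simp [okR]) (by decide)
  · exact fastR_comm hand ans L R hL 3 (by decide) (by decide) (okR_mem R hR) (by decide) (by decide)
  · exact fastL_comm hand ans L R hR 4 (by decide) (okL_mem L hL) (by decide) (by decide)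
  · exact middle_comm hand ans L R hL hR 5 (by decide) (by decide) (by decide) (by decide) (by decide) (by simp [okL]) (by simp [okR]) (by decide)
  · exact fastR_comm hand ans L R hL 6 (by decide) (by decide) (okR_mem R hR) (by decide) (by decide)
  · exact fastL_comm hand ans L R hR 7 (by decide) (okL_mem L hL) (by decide) (by decide)
  · exact middle_comm hand ans L R hL hR 8 (by decide) (by decide) (by decide) (by decide) (by decide) (by simp [okL]) (by simp [okR]) (by decide)
  · exact fastR_comm hand ans L R hL 9 (by decide) (by decide) (okR_mem R hR) (by decide) (by decide)

lemma fold_comm (hand : String) (numbers : List Int)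
    (hp : ∀ n ∈ numbers, 0 ≤ n ∧ n ≤ 9) :
    ∀ s, okL s.2.1 → okR s.2.2 →
      gmap (numbers.foldl (aStep hand) s) = numbers.foldl (bRun (tableB hand)) (gmap s) := by
  induction numbers with
  | nil => intro s _ _; simp
  | cons n ns ih =>
    intro s hL hR
    obtain ⟨hn, hns⟩ := List.forall_mem_cons.mp hp
    obtain ⟨hg, hL', hR'⟩ := step_comm hand s hL hR n hn.1 hn.2
    simp only [List.foldl_cons, ih hns _ hL' hR', hg]

-- ===== VERDICT (by name: the statement is the Claim_ definition above) =====
theorem solution_spec : Claim_equal_solution := by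
  intro numbers hand _ hpre
  unfold Spec_solution solution solution_alt
  have h := fold_comm hand numbers hpre ("", Cell.star, Cell.hash) trivial trivial
  have h2 : (gmap (numbers.foldl (aStep hand) ("", Cell.star, Cell.hash))).1
      = (numbers.foldl (bRun (tableB hand)) ("", 10, 11)).1 := by
    rw [h]; rfl
  simpa [gmap] using h2
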